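-- pv_equiv track=rewrite | github.com/pteru/JARVIS | tools/calculix/scripts/extract_nsets.py | build_nsets
-- ===== SOURCE A (Python) =====
-- def build_nsets(elements_by_set):
--     """Build node sets from surface element connectivity."""
--     nsets = {}
--     for setname, elem_list in elements_by_set.items():
--         node_ids = set()
--         for enodes in elem_list:
--             node_ids.update(enodes)
--         nsets[setname] = sorted(node_ids)
--     return nsets
-- ===== SOURCE B (Python) =====
-- def build_nsets(elements_by_set):
--     """Build node sets from surface element connectivity."""
--     nsets = {}
--     for setname, elem_list in elements_by_set.items():
--         flat = []
--         for enodes in elem_list: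
--             flat.extend(enodes)
--         flat.sort()
--         out = []
--         for n in flat:
--             if not out or out[-1] != n:
--                 out.append(n)
--         nsets[setname] = out
--     return nsets
-- ===== Notes on version B (the rewrite author's own statement) =====
-- stated objective: alternative
-- what changed: Replaces the per-set hash set (set.update then sorted) with a flatten-then-sort pass followed by a single adjacent-duplicate-skipping scan; no set is maintained anywhere.
import Mathlib
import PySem

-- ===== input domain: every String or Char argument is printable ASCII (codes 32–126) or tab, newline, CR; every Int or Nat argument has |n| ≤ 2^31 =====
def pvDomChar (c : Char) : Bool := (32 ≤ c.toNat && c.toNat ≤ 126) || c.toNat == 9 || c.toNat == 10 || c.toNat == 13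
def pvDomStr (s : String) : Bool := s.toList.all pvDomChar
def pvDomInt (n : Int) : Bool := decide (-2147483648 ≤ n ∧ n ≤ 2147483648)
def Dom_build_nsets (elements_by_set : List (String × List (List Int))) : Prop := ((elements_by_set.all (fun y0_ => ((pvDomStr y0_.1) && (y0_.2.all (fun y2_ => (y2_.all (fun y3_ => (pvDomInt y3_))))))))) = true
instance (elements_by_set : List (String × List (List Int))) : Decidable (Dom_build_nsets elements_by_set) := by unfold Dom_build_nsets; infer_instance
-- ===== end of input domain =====

-- B replaces A's per-set hash set with flatten + sort + one adjacent-duplicate-skipping scan (objective: alternative decomposition, same cost).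

-- ===== PORT A =====
def build_nsets (elements_by_set : List (String × List (List Int))) : List (String × List Int) :=
  (elements_by_set.foldl
    (fun nsets p =>
      let node_ids : PySem.Set Int :=
        p.2.foldl (fun s enodes => PySem.Set.update s enodes) PySem.Set.empty
      PySem.Dict.insert nsets p.1 (PySem.List.sorted node_ids (fun x => x)))
    PySem.Dict.empty).items

-- ===== PORT B =====
def build_nsets_alt (elements_by_set : List (String × List (List Int))) : List (String × List Int) :=
  (elements_by_set.foldl
    (fun nsets p =>
      let flat : List Int := p.2.foldl (fun acc enodes => acc ++ enodes) []
      let srt := PySem.List.sorted flat (fun x => x)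
      -- 'if not out or out[-1] != n: out.append(n)': the test is exactly out.getLast? ≠ some n
      let ded := srt.foldl (fun out n => if out.getLast? ≠ some n then out ++ [n] else out) []
      PySem.Dict.insert nsets p.1 ded)
    PySem.Dict.empty).items

-- ===== PRECONDITION & SPEC =====
def Spec_build_nsets (elements_by_set : List (String × List (List Int))) (out : List (String × List Int)) : Prop := out = build_nsets_alt elements_by_set
instance (elements_by_set : List (String × List (List Int))) (out : List (String × List Int)) : Decidable (Spec_build_nsets elements_by_set out) := by unfold Spec_build_nsets; infer_instance

-- ===== CLAIM (what is proved, stated in full; the proofs are below) =====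
def Claim_equal_build_nsets : Prop := ∀ (elements_by_set : List (String × List (List Int))), Dom_build_nsets elements_by_set → Spec_build_nsets elements_by_set (build_nsets elements_by_set)

-- ===== LEMMAS AND PROOFS =====

-- the adjacent-dedup loop body of B
def pvStep (out : List Int) (n : Int) : List Int :=
  if out.getLast? ≠ some n then out ++ [n] else out

-- invariant for B's dedup scan: on a ≤-sorted input (with the accumulator strictly sorted,
-- last-maximal and below the remaining input) the result is strictly sorted, last-maximal,
-- and its members are exactly the old members plus the input's members
theorem pvDedup_invariant (xs : List Int) : ∀ (acc : List Int),
    xs.Pairwise (· ≤ ·) →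
    acc.Pairwise (· < ·) →
    (∀ a ∈ acc, ∀ m, acc.getLast? = some m → a ≤ m) →
    (∀ m, acc.getLast? = some m → ∀ b ∈ xs, m ≤ b) →
    (List.Pairwise (· < ·) (xs.foldl pvStep acc)
      ∧ (∀ a ∈ xs.foldl pvStep acc, ∀ m, (xs.foldl pvStep acc).getLast? = some m → a ≤ m)
      ∧ ∀ y, (y ∈ xs.foldl pvStep acc ↔ y ∈ acc ∨ y ∈ xs)) := by
  induction xs with
  | nil => intro acc _ h1 h2 _; exact ⟨h1, h2, fun y => by simp⟩
  | cons n xs ih =>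
    intro acc hs h1 h2 h3
    have hsx : xs.Pairwise (· ≤ ·) := hs.tail
    have hnb : ∀ b ∈ xs, n ≤ b := fun b hb => List.rel_of_pairwise_cons hs hb
    simp only [List.foldl_cons]
    by_cases hlast : acc.getLast? = some n
    · -- skipped: n already present as acc's last element
      have hstep : pvStep acc n = acc := by simp [pvStep, hlast]
      rw [hstep]
      have := ih acc hsx h1 h2 (fun m hm b hb => by
        rw [hlast] at hm; cases hm; exact hnb b hb)
      refine ⟨this.1, this.2.1, fun y => ?_⟩
      rw [this.2.2 y]
      have hnmem : n ∈ acc := by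
        rcases List.getLast?_eq_some_iff.mp hlast with ⟨ys, rfl⟩; simp
      constructor
      · rintro (h | h)
        · exact Or.inl h
        · exact Or.inr (List.mem_cons_of_mem _ h)
      · rintro (h | h)
        · exact Or.inl h
        · rcases List.mem_cons.mp h with h | h
          · exact Or.inl (h ▸ hnmem)
          · exact Or.inr h
    · -- appended
      have hstep : pvStep acc n = acc ++ [n] := by simp [pvStep, hlast]
      rw [hstep]
      have hlt : ∀ a ∈ acc, a < n := by
        intro a ha
        rcases Option.isSome_iff_exists.mp
          (List.getLast?_isSome.mpr (List.ne_nil_of_mem ha)) with ⟨m, hm⟩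
        have ham : a ≤ m := h2 a ha m hm
        have hmn : m ≤ n := h3 m hm n (by simp)
        have : m ≠ n := fun h => hlast (h ▸ hm)
        omega
      have h1' : (acc ++ [n]).Pairwise (· < ·) := by
        rw [List.pairwise_append]
        exact ⟨h1, List.pairwise_singleton _ _, fun a ha b hb => by
          simp at hb; exact hb ▸ hlt a ha⟩
      have hlast' : (acc ++ [n]).getLast? = some n := by simp
      have h2' : ∀ a ∈ acc ++ [n], ∀ m, (acc ++ [n]).getLast? = some m → a ≤ m := by
        intro a ha m hm
        rw [hlast'] at hm; cases hm
        rcases List.mem_append.mp ha with h | h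
        · exact le_of_lt (hlt a h)
        · simp at h; omega
      have h3' : ∀ m, (acc ++ [n]).getLast? = some m → ∀ b ∈ xs, m ≤ b := by
        intro m hm b hb; rw [hlast'] at hm; cases hm; exact hnb b hb
      have := ih (acc ++ [n]) hsx h1' h2' h3'
      refine ⟨this.1, this.2.1, fun y => ?_⟩
      rw [this.2.2 y]
      simp only [List.mem_append, List.mem_cons,
        List.not_mem_nil, or_false]
      tauto

-- foldl append from an arbitrary start is that start followed by flatten
theorem pvFoldl_append (l : List (List Int)) : ∀ (a : List Int),
    l.foldl (fun acc e => acc ++ e) a = a ++ l.flatten := by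
  induction l with
  | nil => intro a; simp
  | cons x l ih => intro a; simp [ih]

-- the per-set value of A equals the per-set value of B
theorem pvGroup_eq (l : List (List Int)) :
    PySem.List.sorted (l.foldl (fun s enodes => PySem.Set.update s enodes) PySem.Set.empty) (fun x => x)
    = (PySem.List.sorted (l.foldl (fun acc enodes => acc ++ enodes) []) (fun x => x)).foldl
        (fun out n => if out.getLast? ≠ some n then out ++ [n] else out) [] := by
  have hset : l.foldl (fun s enodes => PySem.Set.update s enodes) PySem.Set.empty
      = PySem.Set.ofList l.flatten := by
    have h := PySem.Set.ofList_eq_foldl (xs := l.flatten)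
    rw [h, List.foldl_flatten]; rfl
  have hflat : l.foldl (fun acc enodes => acc ++ enodes) [] = l.flatten := by
    simpa using pvFoldl_append l []
  rw [hset, hflat]
  show _ = List.foldl pvStep [] (PySem.List.sorted l.flatten (fun x : Int => x))
  set srt := PySem.List.sorted l.flatten (fun x : Int => x) with hsrt
  have hsp : srt.Pairwise (· ≤ ·) := by
    simpa using PySem.List.sorted_pairwise l.flatten (fun x : Int => x)
  have hinv := pvDedup_invariant srt [] hsp List.Pairwise.nil (by simp) (by simp)
  apply PySem.List.sorted_eq_of_perm_of_pairwise_lt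
  · rw [List.perm_ext_iff_of_nodup
      (hinv.1.imp (fun h => ne_of_lt h)) (PySem.Set.nodup_ofList _)]
    intro y
    rw [hinv.2.2 y, PySem.Set.mem_ofList]
    simp [hsrt, PySem.List.mem_sorted]
  · exact hinv.1

-- ===== VERDICT (by name: the statement is the Claim_ definition above) =====
theorem build_nsets_spec : Claim_equal_build_nsets := by
  intro ebs _
  unfold Spec_build_nsets
  simp only [build_nsets, build_nsets_alt, pvGroup_eq]
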